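-- pv_equiv track=rewrite | github.com/miliar/Code_Jam_Webscraper | solutions_python/Problem_117/1428.py | scan_row
-- ===== SOURCE A (Python) =====
-- def scan_row(board, row, val):
--   rv = True
--   valCount = 0
--   for num in board[row]:
--     rv = rv and (num == val or num == 0)
--     if num == val:
--       valCount += 1
--   return (rv, valCount)
-- ===== SOURCE B (Python) =====
-- def scan_row(board, row, val):
--     # Build a frequency map of the row once, then answer both questions from it:
--     # the row is all-val-or-zero iff every DISTINCT value (key) is val or 0,
--     # and the tally of val is its frequency (0 if absent).
--     freq = {}
--     for num in board[row]:
--         freq[num] = freq.get(num, 0) + 1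
--     ok = all(k == val or k == 0 for k in freq)
--     return (ok, freq.get(val, 0))
-- ===== Notes on version B (the rewrite author's own statement) =====
-- stated objective: alternative
-- what changed: B builds a frequency dictionary of the row in one pass and then answers both questions from the map: the flag by checking only the DISTINCT keys against {val, 0}, the tally by a single dictionary lookup, instead of A's fused loop that maintains the flag and the counter element by element.
import Mathlib
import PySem

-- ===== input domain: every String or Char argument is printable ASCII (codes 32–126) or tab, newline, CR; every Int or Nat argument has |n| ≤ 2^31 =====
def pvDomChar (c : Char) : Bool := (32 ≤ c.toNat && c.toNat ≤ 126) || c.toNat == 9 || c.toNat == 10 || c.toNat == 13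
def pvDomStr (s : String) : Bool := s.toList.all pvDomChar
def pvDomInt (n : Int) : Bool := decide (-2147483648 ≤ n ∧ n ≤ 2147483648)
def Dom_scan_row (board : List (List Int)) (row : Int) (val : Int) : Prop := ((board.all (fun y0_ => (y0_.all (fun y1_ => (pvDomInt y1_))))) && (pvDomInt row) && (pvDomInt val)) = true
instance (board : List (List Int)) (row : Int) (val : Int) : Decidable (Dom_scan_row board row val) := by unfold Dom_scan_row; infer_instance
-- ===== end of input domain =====

-- B builds a frequency dictionary of the row once and answers both results from the map (keys check + one lookup) instead of A's fused element-by-element loop; objective: alternative.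


-- ===== PORT A =====
-- fused loop: rv = rv and (num == val or num == 0); if num == val: valCount += 1
def scan_row (board : List (List Int)) (row : Int) (val : Int) : Bool × Int :=
  (PySem.List.pyGetD board row []).foldl
    (fun (s : Bool × Int) num =>
      (s.1 && (num == val || num == 0), if num == val then s.2 + 1 else s.2))
    (true, 0)

-- ===== PORT B =====
-- build freq map in one pass, then: flag = all keys in {val, 0}; tally = freq.get(val, 0)
def scan_row_alt (board : List (List Int)) (row : Int) (val : Int) : Bool × Int :=
  let r := PySem.List.pyGetD board row []
  let freq := r.foldl (fun (d : PySem.Dict Int Int) num => d.insert num (d.getD num 0 + 1)) PySem.Dict.empty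
  let ok := freq.keys.all (fun k => k == val || k == 0)
  (ok, freq.getD val 0)

-- ===== PRECONDITION & SPEC =====
-- Pre_ excludes exactly the row indices on which board[row] raises IndexError in A.
def Pre_scan_row (board : List (List Int)) (row : Int) (val : Int) : Prop :=
  PySem.Raise.InRange board.length row
instance (board : List (List Int)) (row : Int) (val : Int) : Decidable (Pre_scan_row board row val) := by unfold Pre_scan_row; infer_instance
def pvWitness_scan_row : List (List Int) × Int × Int := ([[1, 0, 2]], 0, 1)

def Spec_scan_row (board : List (List Int)) (row : Int) (val : Int) (out : Bool × Int) : Prop := out = scan_row_alt board row val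
instance (board : List (List Int)) (row : Int) (val : Int) (out : Bool × Int) : Decidable (Spec_scan_row board row val out) := by unfold Spec_scan_row; infer_instance

-- ===== CLAIM (what is proved, stated in full; the proofs are below) =====
def Claim_equal_scan_row : Prop := ∀ (board : List (List Int)) (row : Int) (val : Int), Dom_scan_row board row val → Pre_scan_row board row val → Spec_scan_row board row val (scan_row board row val)

-- ===== LEMMAS AND PROOFS =====
-- A's fused loop computes (all-val-or-zero, count of val) over the row.
theorem scan_row_foldl (r : List Int) (val : Int) (b : Bool) (c : Int) :
    r.foldl (fun (s : Bool × Int) num =>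
      (s.1 && (num == val || num == 0), if num == val then s.2 + 1 else s.2)) (b, c)
    = (b && r.all (fun num => num == val || num == 0), c + (r.count val : Int)) := by
  induction r generalizing b c with
  | nil => simp
  | cons x xs ih =>
    simp only [List.foldl_cons, ih, List.all_cons, List.count_cons]
    refine Prod.ext ?_ ?_
    · simp [Bool.and_assoc]
    · split_ifs with h <;> simp <;> ring

-- a predicate holds on every distinct element iff it holds on every element
theorem all_ofList (r : List Int) (p : Int → Bool) :
    (PySem.Set.ofList r).all p = r.all p := by
  rw [Bool.eq_iff_iff]
  simp only [List.all_eq_true, PySem.Set.mem_ofList]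

-- ===== VERDICT (by name: the statement is the Claim_ definition above) =====
theorem scan_row_spec : Claim_equal_scan_row := by
  intro board row val _ _
  unfold Spec_scan_row scan_row scan_row_alt
  rw [scan_row_foldl]
  simp only [PySem.Dict.foldl_insert_getD_add_one_eq_counter, PySem.Dict.keys_counter,
    PySem.Dict.getD_counter, all_ofList]
  simp
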